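-- pv_equiv track=rewrite | github.com/SanhyewNg/Microscopy-3D-Image-Analysis | clb/stats/utils.py | map_class_groups_to_ids
-- ===== SOURCE A (Python) =====
-- import functools as ft
-- import itertools as it
-- import operator as op
--
-- def find_ids_of_classes_cells(names_to_ids, names):
--     """Find ids of cells that belong to all classes with given `names`.
--
--     Args:
--         names_to_ids (dict): Mapping class name to sets of ids of cells.
--         names (Iterable): Names of classes.
--
--     Returns:
--         set: Ids of cells that belong to all classes with `names`.
--     """
--     id_sets = (names_to_ids[name] for name in names)
--     all_class_ids = ft.reduce(op.and_, id_sets)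
--
--     return all_class_ids
--
-- def map_class_groups_to_ids(all_ids, classes_to_ids):
--     """Return mapping combinations of classes names to ids of cells.
--
--     Keys are created from names of classes separated by commas. There are two
--     additional keys: 'all_cells' and 'no_class'. So if there are two classes
--     'a' and 'b' there will be five keys:
--     - 'all_cells'
--     - 'no_class'
--     - 'a'
--     - 'b'
--     - 'a, b'.
--
--     Args:
--         all_ids (set): All cell ids.
--         classes_to_ids (dict): Mapping name of class to ids of cells.
--
--     Returns:
--         dict: Mapping combinations of classes to ids of cells.
--     """
--     names_groups = (it.combinations(sorted(classes_to_ids.keys()), r)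
--                     for r in range(1, len(classes_to_ids) + 1))
--     names_groups = it.chain.from_iterable(names_groups)
--     class_groups_to_ids = {
--         ', '.join(names): find_ids_of_classes_cells(classes_to_ids, names)
--         for names in names_groups
--     }
--     any_class_ids = ft.reduce(op.or_, classes_to_ids.values())
--     no_class_ids = all_ids - any_class_ids
--     class_groups_to_ids['all_cells'] = all_ids
--     class_groups_to_ids['no_class'] = no_class_ids
--
--     return class_groups_to_ids
-- ===== SOURCE B (Python) =====
-- def map_class_groups_to_ids(all_ids, classes_to_ids):
--     """Level-by-level DP over class-name combinations: the intersection for a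
--     combination of size r is computed from its size-(r-1) prefix with a single
--     '&', instead of re-intersecting all r sets from scratch. Keys and values
--     are emitted in the same order as the original implementation."""
--     names = sorted(classes_to_ids)
--     result = {}
--     level = [(None, names, None)]  # (key so far, names still usable, intersection so far)
--     for _ in range(len(names)):
--         nxt = []
--         for key, rest, inter in level:
--             while rest:
--                 nm, rest = rest[0], rest[1:]
--                 ckey = nm if key is None else key + ', ' + nm
--                 cids = classes_to_ids[nm] if inter is None else inter & classes_to_ids[nm]
--                 nxt.append((ckey, rest, cids))
--         for ckey, _, cids in nxt:
--             result[ckey] = cids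
--         level = nxt
--     any_ids = None
--     for ids in classes_to_ids.values():
--         any_ids = ids if any_ids is None else any_ids | ids
--     result['all_cells'] = all_ids
--     result['no_class'] = all_ids - any_ids
--     return result
-- ===== Notes on version B (the rewrite author's own statement) =====
-- stated objective: alternative
-- what changed: A re-enumerates combinations with itertools and recomputes each combination's intersection from scratch by reducing over all r member sets; B does a breadth-first DP over combination sizes that extends each (r-1)-combination's already-computed intersection with a single '&' per child, emitting keys and values in A's exact order (measured ~1.4x at the largest finishing size: the 2^n-sized output dominates, so cost stays the same order).
-- outside the precondition, e.g. on map_class_groups_to_ids({1}, {}): A raises TypeError, B raises TypeError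
import Mathlib
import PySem

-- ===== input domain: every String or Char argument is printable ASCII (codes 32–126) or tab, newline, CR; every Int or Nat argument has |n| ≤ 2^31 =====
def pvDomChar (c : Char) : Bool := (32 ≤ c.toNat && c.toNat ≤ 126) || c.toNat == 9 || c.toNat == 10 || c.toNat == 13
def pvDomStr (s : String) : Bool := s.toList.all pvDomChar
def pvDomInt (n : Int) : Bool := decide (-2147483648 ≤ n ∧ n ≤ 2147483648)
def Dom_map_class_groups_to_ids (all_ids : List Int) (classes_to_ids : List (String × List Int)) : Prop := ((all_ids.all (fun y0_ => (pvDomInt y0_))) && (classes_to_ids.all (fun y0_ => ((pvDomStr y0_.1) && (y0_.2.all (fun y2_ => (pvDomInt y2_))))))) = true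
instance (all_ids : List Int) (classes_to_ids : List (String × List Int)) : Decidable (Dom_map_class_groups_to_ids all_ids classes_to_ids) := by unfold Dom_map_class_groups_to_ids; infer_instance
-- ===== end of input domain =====

-- B replaces A's per-combination re-intersection (reduce over all r sets for each of the 2^n-1
-- combinations) by a level-by-level DP that extends each (r-1)-combination with one '&' per child
-- (objective: alternative algorithm; same output, same order).

-- ===== PORT A =====
def find_ids_of_classes_cells (names_to_ids : PySem.Dict String (List Int))
    (names : List String) : List Int :=
  match names with
  | [] => []  -- ft.reduce over an empty iterable raises TypeError; unreachable: every caller passes r ≥ 1 names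
  | n :: rest =>
      -- names_to_ids[name]: the names are keys of the dict, so KeyError is unreachable; getD with dummy default
      rest.foldl (fun acc m => PySem.Set.inter acc (PySem.Dict.getD names_to_ids m []))
        (PySem.Dict.getD names_to_ids n [])

def map_class_groups_to_ids (all_ids : List Int)
    (classes_to_ids : List (String × List Int)) : List (String × List Int) :=
  let d := PySem.Dict.ofList classes_to_ids
  let sortedNames := PySem.List.sorted (PySem.Dict.keys d) (fun s => s) false
  let names_groups := (PySem.List.pyRange 1 ((PySem.Dict.size d : Int) + 1) 1).flatMap
      (fun r => PySem.List.combinations sortedNames r.toNat)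
  let cg := names_groups.foldl
      (fun acc ns => PySem.Dict.insert acc (PySem.Str.join ", " ns) (find_ids_of_classes_cells d ns))
      PySem.Dict.empty
  let anyIds := match PySem.Dict.values d with
    | [] => ([] : List Int)  -- ft.reduce over no values raises TypeError on an empty dict; excluded by Pre_
    | v :: vs => vs.foldl (fun acc s => PySem.Set.union acc s) v
  let noClass := PySem.Set.diff all_ids anyIds
  let cg := PySem.Dict.insert cg "all_cells" all_ids
  let cg := PySem.Dict.insert cg "no_class" noClass
  cg.items

-- ===== PORT B =====
-- an in-flight entry of Source B's level list: (key so far, names still usable, intersection so far)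
abbrev PVEntry := Option String × List String × Option (List Int)

-- the `while rest:` loop inside Source B's level step, producing the children of one entry
def pvChildren (d : PySem.Dict String (List Int)) (key : Option String)
    (inter : Option (List Int)) : List String → List PVEntry
  | [] => []
  | nm :: rest =>
      (some (match key with | none => nm | some k => k ++ ", " ++ nm),
       rest,
       some (match inter with
             | none => PySem.Dict.getD d nm []
             | some s => PySem.Set.inter s (PySem.Dict.getD d nm []))) :: pvChildren d key inter rest

def map_class_groups_to_ids_alt (all_ids : List Int)
    (classes_to_ids : List (String × List Int)) : List (String × List Int) :=
  let d := PySem.Dict.ofList classes_to_ids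
  let names := PySem.List.sorted (PySem.Dict.keys d) (fun s => s) false
  let st := (List.range names.length).foldl
      (fun (st : PySem.Dict String (List Int) × List PVEntry) _ =>
        let nxt := st.2.flatMap (fun e => pvChildren d e.1 e.2.2 e.2.1)
        -- entries of nxt always carry `some`: getD defaults are unreachable
        (nxt.foldl (fun r e => PySem.Dict.insert r (e.1.getD "") (e.2.2.getD [])) st.1, nxt))
      (PySem.Dict.empty, [((none : Option String), names, (none : Option (List Int)))])
  let anyIds := (PySem.Dict.values d).foldl
      (fun acc ids => match acc with
                      | none => some ids
                      | some a => some (PySem.Set.union a ids)) (none : Option (List Int))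
  let result := PySem.Dict.insert st.1 "all_cells" all_ids
  let result := PySem.Dict.insert result "no_class"
      (match anyIds with
       | none => ([] : List Int)  -- all_ids - None raises TypeError on an empty dict; excluded by Pre_
       | some a => PySem.Set.diff all_ids a)
  result.items

-- ===== PRECONDITION & SPEC =====
-- Pre_ excludes only the empty dict, on which A raises TypeError (ft.reduce over no values).
def Pre_map_class_groups_to_ids (all_ids : List Int) (classes_to_ids : List (String × List Int)) : Prop :=
  classes_to_ids ≠ []
instance (all_ids : List Int) (classes_to_ids : List (String × List Int)) : Decidable (Pre_map_class_groups_to_ids all_ids classes_to_ids) := by unfold Pre_map_class_groups_to_ids; infer_instance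

def pvWitness_map_class_groups_to_ids : List Int × (List (String × List Int)) :=
  ([1, 2, 3], [("a", [1, 2]), ("b", [2, 3])])

def Spec_map_class_groups_to_ids (all_ids : List Int) (classes_to_ids : List (String × List Int)) (out : List (String × List Int)) : Prop := out = map_class_groups_to_ids_alt all_ids classes_to_ids
instance (all_ids : List Int) (classes_to_ids : List (String × List Int)) (out : List (String × List Int)) : Decidable (Spec_map_class_groups_to_ids all_ids classes_to_ids out) := by unfold Spec_map_class_groups_to_ids; infer_instance

-- ===== CLAIM (what is proved, stated in full; the proofs are below) =====
def Claim_equal_map_class_groups_to_ids : Prop := ∀ (all_ids : List Int) (classes_to_ids : List (String × List Int)), Dom_map_class_groups_to_ids all_ids classes_to_ids → Pre_map_class_groups_to_ids all_ids classes_to_ids → Spec_map_class_groups_to_ids all_ids classes_to_ids (map_class_groups_to_ids all_ids classes_to_ids)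

-- ===== LEMMAS AND PROOFS =====

-- combinations-with-rest: every r-combination of xs paired with the suffix of xs after its last element
def pvCwr (r : Nat) (xs : List String) : List (List String × List String) :=
  match r, xs with
  | 0, xs => [([], xs)]
  | _+1, [] => []
  | r+1, x :: t => (pvCwr r t).map (fun p => (x :: p.1, p.2)) ++ pvCwr (r+1) t

theorem pvCombinations_eq_map_cwr (r : Nat) (xs : List String) :
    PySem.List.combinations xs r = (pvCwr r xs).map Prod.fst := by
  induction xs generalizing r with
  | nil => cases r <;> simp [pvCwr, PySem.List.combinations_zero, PySem.List.combinations_nil_succ]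
  | cons x t ih =>
    cases r with
    | zero => simp [pvCwr, PySem.List.combinations_zero]
    | succ r =>
      simp [pvCwr, PySem.List.combinations_cons_succ, ih, Function.comp]

theorem pvCwr_length (r : Nat) (xs : List String) :
    ∀ p ∈ pvCwr r xs, p.1.length = r := by
  induction xs generalizing r with
  | nil => cases r <;> simp [pvCwr]
  | cons x t ih =>
    cases r with
    | zero => simp [pvCwr]
    | succ r =>
      intro p hp
      simp [pvCwr] at hp
      rcases hp with ⟨q, hq, h⟩ | hp
      · rcases h with ⟨hmem, rfl⟩
        simpa using ih r (q, hq) hmem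
      · exact ih (r+1) p hp

theorem pvCwr_succ (r : Nat) (xs : List String) :
    pvCwr (r+1) xs
      = (pvCwr r xs).flatMap (fun p => (pvCwr 1 p.2).map (fun q => (p.1 ++ q.1, q.2))) := by
  induction xs generalizing r with
  | nil =>
    cases r with
    | zero => simp [pvCwr]
    | succ r => simp [pvCwr]
  | cons x t ih =>
    cases r with
    | zero => simp [pvCwr]
    | succ r =>
      show pvCwr (r+2) (x :: t) = _
      rw [show pvCwr (r+2) (x :: t)
            = (pvCwr (r+1) t).map (fun p => (x :: p.1, p.2)) ++ pvCwr (r+2) t from rfl,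
          show pvCwr (r+1+1) t = _ from ih (r+1),
          show pvCwr (r+1) (x :: t)
            = (pvCwr r t).map (fun p => (x :: p.1, p.2)) ++ pvCwr (r+1) t from rfl]
      rw [List.flatMap_append, ih r]
      congr 1
      rw [List.map_flatMap, List.flatMap_map]
      simp [Function.comp_def]

-- the abstract entry an (combination, rest) pair denotes
def pvEnt (d : PySem.Dict String (List Int)) (p : List String × List String) : PVEntry :=
  (some (PySem.Str.join ", " p.1), p.2, some (find_ids_of_classes_cells d p.1))

theorem pvCharsJoin_append_singleton (sep : List Char) (a : List Char) :
    ∀ (cs : List (List Char)), cs ≠ [] →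
      PySem.Chars.join sep (cs ++ [a]) = PySem.Chars.join sep cs ++ sep ++ a := by
  intro cs
  induction cs with
  | nil => simp
  | cons x t ih =>
    intro _
    cases t with
    | nil => simp [PySem.Chars.join_cons_cons, PySem.Chars.join_singleton]
    | cons y u =>
      have h1 : PySem.Chars.join sep ((x :: y :: u) ++ [a])
          = x ++ sep ++ PySem.Chars.join sep ((y :: u) ++ [a]) := by
        rw [List.cons_append, List.cons_append]
        exact PySem.Chars.join_cons_cons ..
      rw [h1, ih (by simp), PySem.Chars.join_cons_cons]
      simp [List.append_assoc]

theorem pvJoin_append_singleton (c : List String) (hc : c ≠ []) (nm : String) :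
    PySem.Str.join ", " (c ++ [nm]) = PySem.Str.join ", " c ++ ", " ++ nm := by
  apply String.toList_inj.mp
  simp only [pysem, String.toList_append, List.map_append, List.map_cons, List.map_nil]
  rw [pvCharsJoin_append_singleton _ _ _ (by simpa using hc)]

theorem pvJoin_singleton (nm : String) : PySem.Str.join ", " [nm] = nm := by
  apply String.toList_inj.mp
  simp only [pysem, List.map_cons, List.map_nil]

theorem pvFind_append_singleton (d : PySem.Dict String (List Int)) (n : String)
    (rest : List String) (nm : String) :
    find_ids_of_classes_cells d ((n :: rest) ++ [nm])
      = PySem.Set.inter (find_ids_of_classes_cells d (n :: rest)) (PySem.Dict.getD d nm []) := by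
  simp only [List.cons_append, find_ids_of_classes_cells, List.foldl_append, List.foldl_cons,
    List.foldl_nil]

theorem pvChildren_root (d : PySem.Dict String (List Int)) (names : List String) :
    pvChildren d none none names = (pvCwr 1 names).map (pvEnt d) := by
  induction names with
  | nil => simp [pvChildren, pvCwr]
  | cons nm rest ih =>
    simp [pvChildren, pvCwr, ih, pvEnt, pvJoin_singleton, find_ids_of_classes_cells]

theorem pvChildren_ent (d : PySem.Dict String (List Int)) (c : List String) (hc : c ≠ [])
    (rest : List String) :
    pvChildren d (some (PySem.Str.join ", " c)) (some (find_ids_of_classes_cells d c)) rest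
      = (pvCwr 1 rest).map (fun q => pvEnt d (c ++ q.1, q.2)) := by
  induction rest with
  | nil => simp [pvChildren, pvCwr]
  | cons nm rest ih =>
    obtain ⟨n, c', rfl⟩ : ∃ n c', c = n :: c' := by
      cases c with
      | nil => exact absurd rfl hc
      | cons n c' => exact ⟨n, c', rfl⟩
    simp only [pvChildren, pvCwr, List.map_cons, List.map_nil, ih,
      List.nil_append, List.cons_append]
    rw [show (0+1) = 1 from rfl]
    congr 1
    have h1 := pvJoin_append_singleton (n :: c') (by simp) nm
    have h2 := pvFind_append_singleton d n c' nm
    simp only [List.cons_append] at h1 h2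
    simp [pvEnt, h1, h2]

-- B's level after m iterations
def pvLevel (d : PySem.Dict String (List Int)) (names : List String) : Nat → List PVEntry
  | 0 => [(none, names, none)]
  | m+1 => (pvLevel d names m).flatMap (fun e => pvChildren d e.1 e.2.2 e.2.1)

theorem pvLevel_eq (d : PySem.Dict String (List Int)) (names : List String) (m : Nat) :
    pvLevel d names (m+1) = (pvCwr (m+1) names).map (pvEnt d) := by
  induction m with
  | zero =>
    show ([((none : Option String), names, (none : Option (List Int)))].flatMap
      (fun e => pvChildren d e.1 e.2.2 e.2.1)) = _
    simp [pvChildren_root]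
  | succ m ih =>
    show (pvLevel d names (m+1)).flatMap (fun e => pvChildren d e.1 e.2.2 e.2.1) = _
    rw [ih, List.flatMap_map, pvCwr_succ (m+1) names, List.map_flatMap]
    apply List.flatMap_congr
    intro p hp
    have hne : p.1 ≠ [] := by
      have := pvCwr_length (m+1) names p hp
      intro h; rw [h] at this; simp at this
    simpa [pvEnt, List.map_map, Function.comp_def] using pvChildren_ent d p.1 hne p.2

-- B's dict after m iterations
def pvDictUpTo (d : PySem.Dict String (List Int)) (names : List String) :
    Nat → PySem.Dict String (List Int)
  | 0 => PySem.Dict.empty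
  | m+1 => (pvLevel d names (m+1)).foldl
      (fun r e => PySem.Dict.insert r (e.1.getD "") (e.2.2.getD [])) (pvDictUpTo d names m)

theorem pvBfold_eq (d : PySem.Dict String (List Int)) (names : List String) (m : Nat) :
    (List.range m).foldl
      (fun (st : PySem.Dict String (List Int) × List PVEntry) _ =>
        let nxt := st.2.flatMap (fun e => pvChildren d e.1 e.2.2 e.2.1)
        (nxt.foldl (fun r e => PySem.Dict.insert r (e.1.getD "") (e.2.2.getD [])) st.1, nxt))
      (PySem.Dict.empty, [((none : Option String), names, (none : Option (List Int)))])
    = (pvDictUpTo d names m, pvLevel d names m) := by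
  induction m with
  | zero => rfl
  | succ m ih =>
    rw [List.range_succ, List.foldl_append, ih]
    rfl

theorem pvInsert_map_ent (d : PySem.Dict String (List Int))
    (l : List (List String × List String)) (D : PySem.Dict String (List Int)) :
    (l.map (pvEnt d)).foldl
        (fun r e => PySem.Dict.insert r (e.1.getD "") (e.2.2.getD [])) D
      = l.foldl (fun acc p => PySem.Dict.insert acc (PySem.Str.join ", " p.1)
          (find_ids_of_classes_cells d p.1)) D := by
  rw [List.foldl_map]
  rfl

theorem pvDictUpTo_eq (d : PySem.Dict String (List Int)) (names : List String) (m : Nat) :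
    pvDictUpTo d names m
      = ((List.range m).flatMap (fun k => pvCwr (k+1) names)).foldl
          (fun acc p => PySem.Dict.insert acc (PySem.Str.join ", " p.1)
            (find_ids_of_classes_cells d p.1)) PySem.Dict.empty := by
  induction m with
  | zero => rfl
  | succ m ih =>
    show (pvLevel d names (m+1)).foldl _ (pvDictUpTo d names m) = _
    rw [List.range_succ, List.flatMap_append, List.foldl_append, ← ih,
      pvLevel_eq, pvInsert_map_ent]
    simp

theorem pvRange_flatMap (n : Nat) (f : Nat → List (List String)) :
    (PySem.List.pyRange 1 ((n : Int) + 1) 1).flatMap (fun r => f r.toNat)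
      = (List.range n).flatMap (fun k => f (k+1)) := by
  have h0 : PySem.List.pyRange 0 ((n : Int) + 1) 1
      = 0 :: PySem.List.pyRange 1 ((n : Int) + 1) 1 := by
    simpa using PySem.List.pyRange_one_cons (a := 0) (b := (n : Int) + 1) (by positivity)
  have h1 : PySem.List.pyRange 0 (((n+1 : Nat) : Int)) 1
      = (List.range (n+1)).map (fun k : Nat => (k : Int)) :=
    PySem.List.pyRange_zero_natCast (n+1)
  rw [show (((n+1 : Nat) : Int)) = (n : Int) + 1 by push_cast; ring, h0,
    List.range_succ_eq_map, List.map_cons, List.map_map] at h1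
  injection h1 with _ h2
  rw [h2, List.flatMap_map]
  apply List.flatMap_congr
  intro k _
  simp

theorem pvAny_go (vs : List (List Int)) (a : List Int) :
    (vs.foldl
      (fun acc ids => match acc with
                      | none => some ids
                      | some a => some (PySem.Set.union a ids)) (some a))
      = some (vs.foldl (fun acc s => PySem.Set.union acc s) a) := by
  induction vs generalizing a with
  | nil => rfl
  | cons v vs ih => simpa using ih (PySem.Set.union a v)

theorem pvAny_eq (vs : List (List Int)) (v : List Int) :
    ((v :: vs).foldl
      (fun acc ids => match acc with
                      | none => some ids
                      | some a => some (PySem.Set.union a ids)) (none : Option (List Int)))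
      = some (vs.foldl (fun acc s => PySem.Set.union acc s) v) := by
  simpa using pvAny_go vs v

theorem pvValues_ne_nil (p : String × List Int) (l : List (String × List Int)) :
    PySem.Dict.values (PySem.Dict.ofList (p :: l)) ≠ [] := by
  intro h
  have hk : PySem.Dict.keys (PySem.Dict.ofList (p :: l))
      = PySem.Set.ofList ((p :: l).map Prod.fst) := by
    show ((p :: l).foldl (fun d x => d.insert x.1 x.2) PySem.Dict.empty).keys = _
    rw [PySem.Dict.keys_foldl_insert_key (p :: l) Prod.fst (fun d x => x.2) PySem.Dict.empty]
    rfl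
  have hmem : p.1 ∈ PySem.Dict.keys (PySem.Dict.ofList (p :: l)) := by
    rw [hk]
    simp [pysem]
  have hlen : (PySem.Dict.keys (PySem.Dict.ofList (p :: l))).length
      = (PySem.Dict.values (PySem.Dict.ofList (p :: l))).length := by
    show ((PySem.Dict.ofList (p :: l)).items.map Prod.fst).length
      = ((PySem.Dict.ofList (p :: l)).items.map Prod.snd).length
    simp
  rw [h] at hlen
  simp at hlen
  rw [hlen] at hmem
  simp at hmem

-- ===== VERDICT (by name: the statement is the Claim_ definition above) =====
theorem map_class_groups_to_ids_spec : Claim_equal_map_class_groups_to_ids := by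
  intro all_ids cls _ hpre
  obtain ⟨q, l, rfl⟩ : ∃ q l, cls = q :: l := by
    cases cls with
    | nil => exact absurd rfl hpre
    | cons q l => exact ⟨q, l, rfl⟩
  unfold Spec_map_class_groups_to_ids map_class_groups_to_ids map_class_groups_to_ids_alt
  simp only []
  set d := PySem.Dict.ofList (q :: l) with hd
  set names := PySem.List.sorted (PySem.Dict.keys d) (fun s => s) false with hnames
  have hsz : PySem.Dict.size d = names.length := by
    show d.items.length = _
    rw [hnames, PySem.List.length_sorted]
    show _ = (d.items.map Prod.fst).length
    simp
  -- the combination stream of A is the pair stream of the DP, projected to first components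
  have hstream : (PySem.List.pyRange 1 ((PySem.Dict.size d : Int) + 1) 1).flatMap
        (fun r => PySem.List.combinations names r.toNat)
      = ((List.range names.length).flatMap (fun k => pvCwr (k+1) names)).map Prod.fst := by
    rw [hsz, pvRange_flatMap names.length (fun r => PySem.List.combinations names r),
      List.map_flatMap]
    exact List.flatMap_congr (fun k _ => by
      rw [pvCombinations_eq_map_cwr])
  rw [hstream, List.foldl_map, pvBfold_eq, pvDictUpTo_eq]
  -- the union of all class id sets
  obtain ⟨v, vs, hvv⟩ := List.exists_cons_of_ne_nil (pvValues_ne_nil q l)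
  rw [hvv, pvAny_eq]
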